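-- pv_equiv track=rewrite | github.com/prkanani/mcpthreetiermemory | TwoDimensionalBinarySearch.py | binary_search_2d
-- ===== SOURCE A (Python) =====
-- def binary_search_2d(matrix, target):
--     if not matrix or not matrix[0]:
--         return False
--     rows = len(matrix)
--     cols = len(matrix[0])
--
--     left = 0
--     right = rows * cols - 1
--
--     while left <= right:
--         mid = (left + right) // 2
--         mid_value = matrix[mid // cols][mid % cols]
--
--         if mid_value == target:
--             return True
--         elif mid_value < target:
--             left = mid + 1
--         else:
--             right = mid - 1
--
--     return False
-- ===== SOURCE B (Python) =====
-- def binary_search_2d(matrix, target):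
--     if not matrix or not matrix[0]:
--         return False
--     col = len(matrix[0]) - 1
--     for row in matrix:
--         while col >= 0 and row[col] > target:
--             col -= 1
--         if col < 0:
--             return False
--         if row[col] == target:
--             return True
--     return False
-- ===== Notes on version B (the rewrite author's own statement) =====
-- stated objective: alternative
-- what changed: Replaced the binary search over a flattened index space by a per-row staircase scan: one pass over the rows carrying a monotonically shrinking column cursor (move the cursor left past values greater than the target, test equality, fall through to the next row); …
-- outside the precondition, e.g. on binary_search_2d([[2, 1]], 1): A returns False, B returns True; on binary_search_2d([[1, 2], [3]], 3): A returns True, B raises IndexError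
import Mathlib
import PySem

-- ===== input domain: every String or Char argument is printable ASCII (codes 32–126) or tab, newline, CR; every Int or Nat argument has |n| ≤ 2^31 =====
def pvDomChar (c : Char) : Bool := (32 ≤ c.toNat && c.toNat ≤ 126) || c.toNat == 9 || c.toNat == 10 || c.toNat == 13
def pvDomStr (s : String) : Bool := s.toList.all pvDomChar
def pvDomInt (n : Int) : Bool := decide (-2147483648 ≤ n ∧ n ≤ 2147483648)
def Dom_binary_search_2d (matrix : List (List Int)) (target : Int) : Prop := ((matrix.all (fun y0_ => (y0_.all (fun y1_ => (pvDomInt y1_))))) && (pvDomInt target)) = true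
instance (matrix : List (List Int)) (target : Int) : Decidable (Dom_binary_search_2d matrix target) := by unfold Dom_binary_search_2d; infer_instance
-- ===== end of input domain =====

-- B replaces A's binary search over the flattened index space by a single pass over the
-- rows carrying a shrinking column cursor (alternative algorithm, similar cost on these sizes).

-- ===== PORT A =====
-- the while loop of A, totalized by a fuel bound on the number of iterations
-- (fuel ≥ right+1-left suffices; the callers pass rows*cols).
-- `none` from indexing = IndexError in Python (excluded by Pre_)
def pvBsLoop (matrix : List (List Int)) (target : Int) (cols : Int)
    (fuel : Nat) (left right : Int) : Bool :=
  match fuel with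
  | 0 => false
  | f + 1 =>
    if left ≤ right then
      let mid := PySem.Int.floordiv (left + right) 2
      match (PySem.List.pyGet? matrix (PySem.Int.floordiv mid cols)).bind
            (fun r => PySem.List.pyGet? r (PySem.Int.mod mid cols)) with
      | none => false
      | some mid_value =>
        if mid_value = target then true
        else if mid_value < target then pvBsLoop matrix target cols f (mid + 1) right
        else pvBsLoop matrix target cols f left (mid - 1)
    else false

def binary_search_2d (matrix : List (List Int)) (target : Int) : Bool :=
  match matrix with
  | [] => false
  | r0 :: _ =>
    if r0 = [] then false
    else
      let rows : Int := matrix.length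
      let cols : Int := r0.length
      pvBsLoop matrix target cols (matrix.length * r0.length) 0 (rows * cols - 1)

-- ===== PORT B =====
-- B's inner while loop: 'while col >= 0 and row[col] > target: col -= 1'
-- (a `none` lookup is an IndexError in Python, outside Pre_; the port just stops there)
def pvDropCol (row : List Int) (target : Int) (col : Int) : Int :=
  if h : 0 ≤ col then
    match PySem.List.pyGet? row col with
    | none => col
    | some v => if target < v then pvDropCol row target (col - 1) else col
  else col
termination_by (col + 1).toNat
decreasing_by omega

-- B's for loop over the rows, carrying the column cursor
def pvRowScan (target : Int) : List (List Int) → Int → Bool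
  | [], _ => false
  | row :: rest, col =>
    let col' := pvDropCol row target col
    if col' < 0 then false
    else
      match PySem.List.pyGet? row col' with
      | none => false
      | some v => if v = target then true else pvRowScan target rest col'

def binary_search_2d_alt (matrix : List (List Int)) (target : Int) : Bool :=
  match matrix with
  | [] => false
  | r0 :: _ =>
    if r0 = [] then false
    else pvRowScan target matrix ((r0.length : Int) - 1)

-- ===== PRECONDITION & SPEC =====
-- the cells both programs actually read: the first (length of the first row) columns of every row
def pvTrunc (matrix : List (List Int)) (c : Nat) : List Int :=
  (matrix.map (List.take c)).flatten

-- Pre_ excludes matrices with a row SHORTER than the first row (there A can raise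
-- IndexError, and B can too), and matrices whose read cells are unsorted yet contain the
-- target, where A's True/False answer is an accident of which cells its binary probes
-- happen to visit, as defensible as any other. Rows longer than the first are fine: both
-- programs only ever read the first len(matrix[0]) columns, so the sorted-or-absent
-- condition is stated on that truncated block.
def Pre_binary_search_2d (matrix : List (List Int)) (target : Int) : Prop :=
  (∀ r ∈ matrix, (matrix.headD []).length ≤ r.length) ∧
  ((pvTrunc matrix (matrix.headD []).length).Pairwise (· ≤ ·) ∨
   target ∉ pvTrunc matrix (matrix.headD []).length)
instance (matrix : List (List Int)) (target : Int) : Decidable (Pre_binary_search_2d matrix target) := by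
  unfold Pre_binary_search_2d; infer_instance

def pvWitness_binary_search_2d : List (List Int) × Int := ([[1, 2], [3, 4]], 3)

def Spec_binary_search_2d (matrix : List (List Int)) (target : Int) (out : Bool) : Prop := out = binary_search_2d_alt matrix target
instance (matrix : List (List Int)) (target : Int) (out : Bool) : Decidable (Spec_binary_search_2d matrix target out) := by unfold Spec_binary_search_2d; infer_instance

-- ===== CLAIM (what is proved, stated in full; the proofs are below) =====
def Claim_equal_binary_search_2d : Prop := ∀ (matrix : List (List Int)) (target : Int), Dom_binary_search_2d matrix target → Pre_binary_search_2d matrix target → Spec_binary_search_2d matrix target (binary_search_2d matrix target)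

-- ===== LEMMAS AND PROOFS =====

-- (matrix[i]?).bind (·[j]?) read through the truncated flattened list
theorem pv_flat_get {matrix : List (List Int)} {c : Nat}
    (rect : ∀ r ∈ matrix, c ≤ r.length) (i j : Nat) (hj : j < c) :
    (pvTrunc matrix c)[i * c + j]? = (matrix[i]?).bind (fun r => r[j]?) := by
  induction matrix generalizing i with
  | nil => simp [pvTrunc]
  | cons r tl ih =>
    have hr : c ≤ r.length := rect r (by simp)
    have hT : pvTrunc (r :: tl) c = r.take c ++ pvTrunc tl c := by
      simp [pvTrunc]
    have hTlen : (r.take c).length = c := by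
      simp [List.length_take]; omega
    cases i with
    | zero =>
      simp only [Nat.zero_mul, Nat.zero_add, hT, List.getElem?_cons_zero, Option.bind_some]
      rw [List.getElem?_append_left (by omega)]
      exact List.getElem?_take_of_lt hj
    | succ i' =>
      simp only [hT, List.getElem?_cons_succ]
      have he : (i' + 1) * c + j = (r.take c).length + (i' * c + j) := by rw [hTlen]; ring
      rw [he, List.getElem?_append_right (by omega)]
      simpa using ih (fun x hx => rect x (by simp [hx])) i'

theorem pv_flat_len {matrix : List (List Int)} {c : Nat}
    (rect : ∀ r ∈ matrix, c ≤ r.length) :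
    (pvTrunc matrix c).length = matrix.length * c := by
  induction matrix with
  | nil => simp [pvTrunc]
  | cons r tl ih =>
    have hr : c ≤ r.length := rect r (by simp)
    have := ih (fun x hx => rect x (by simp [hx]))
    simp only [pvTrunc, List.map_cons, List.flatten_cons, List.length_append, List.length_take]
    simp only [pvTrunc] at this
    rw [this]
    simp only [List.length_cons]
    have : min c r.length = c := by omega
    rw [this]; ring

theorem pv_mono {flat : List Int} (hs : flat.Pairwise (· ≤ ·))
    {a b : Nat} (hab : a ≤ b) (hb : b < flat.length) :
    flat[a]'(by omega) ≤ flat[b] := by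
  rcases Nat.lt_or_ge a b with h | h
  · exact (List.pairwise_iff_getElem.mp hs) a b (by omega) hb h
  · have : a = b := by omega
    subst this; exact le_refl _

-- A's probe matrix[m // c][m % c] read through the truncated flattened list
theorem pv_div_get {matrix : List (List Int)} {c : Nat}
    (rect : ∀ r ∈ matrix, c ≤ r.length) (hc : 0 < c) {m : Int}
    (h0 : 0 ≤ m) (hm : m < ((pvTrunc matrix c).length : Int)) :
    (PySem.List.pyGet? matrix (PySem.Int.floordiv m c)).bind
      (fun r => PySem.List.pyGet? r (PySem.Int.mod m c)) = (pvTrunc matrix c)[m.toNat]? := by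
  have hcpos : (0 : Int) < (c : Int) := by exact_mod_cast hc
  rw [PySem.Int.floordiv_eq_ediv_of_pos hcpos, PySem.Int.mod_eq_emod_of_pos hcpos]
  have hq0 : 0 ≤ m / (c : Int) := Int.ediv_nonneg h0 (le_of_lt hcpos)
  have hr0 : 0 ≤ m % (c : Int) := Int.emod_nonneg m (ne_of_gt hcpos)
  have hrc : m % (c : Int) < c := Int.emod_lt_of_pos m hcpos
  set i : Nat := (m / (c : Int)).toNat with hi
  set j : Nat := (m % (c : Int)).toNat with hj
  have hjc : j < c := by omega
  have hidx : ((i * c + j : Nat) : Int) = m := by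
    push_cast
    rw [hi, hj, Int.toNat_of_nonneg hq0, Int.toNat_of_nonneg hr0, Int.mul_comm]
    exact Int.mul_ediv_add_emod m (c : Int)
  have hidx' : i * c + j = m.toNat := by
    have := congrArg Int.toNat hidx
    simpa using this
  rw [PySem.List.pyGet?_of_nonneg _ hq0]
  simp only [PySem.List.pyGet?_of_nonneg _ hr0]
  rw [← hidx', pv_flat_get rect i j hjc]

theorem pv_bs_iff {matrix : List (List Int)} {target : Int} {c : Nat}
    (rect : ∀ r ∈ matrix, c ≤ r.length)
    (hs : (pvTrunc matrix c).Pairwise (· ≤ ·)) (hc : 0 < c) :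
    ∀ fuel : Nat, ∀ left right : Int, (right + 1 - left).toNat ≤ fuel →
    0 ≤ left → right < ((pvTrunc matrix c).length : Int) →
    (pvBsLoop matrix target c fuel left right = true ↔
      ∃ k : Nat, left ≤ (k : Int) ∧ (k : Int) ≤ right ∧ (pvTrunc matrix c)[k]? = some target) := by
  intro fuel
  induction fuel with
  | zero =>
    intro left right hn hl hr
    rw [pvBsLoop]
    simp only [false_iff, Bool.false_eq_true]
    rintro ⟨k, hk1, hk2, _⟩; omega
  | succ f ih =>
    intro left right hn hl hr
    rw [pvBsLoop]
    by_cases h : left ≤ right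
    · rw [if_pos h]
      have hb := PySem.Int.floordiv_two_mid_bounds h
      set mid := PySem.Int.floordiv (left + right) 2 with hmid
      have hm0 : 0 ≤ mid := le_trans hl hb.1
      have hmlen : mid < ((pvTrunc matrix c).length : Int) := lt_of_le_of_lt hb.2 hr
      have hlook := pv_div_get rect hc hm0 hmlen
      have hmemN : mid.toNat < (pvTrunc matrix c).length := by omega
      have hsome : (pvTrunc matrix c)[mid.toNat]? = some ((pvTrunc matrix c)[mid.toNat]) :=
        List.getElem?_eq_getElem hmemN
      simp only [hlook, hsome]
      set v := (pvTrunc matrix c)[mid.toNat] with hv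
      by_cases hveq : v = target
      · simp only [if_pos hveq, true_iff]
        exact ⟨mid.toNat, by omega, by omega, by rw [hsome, hveq]⟩
      · rw [if_neg hveq]
        by_cases hvlt : v < target
        · rw [if_pos hvlt]
          rw [ih (mid + 1) right (by omega) (by omega) hr]
          constructor
          · rintro ⟨k, hk1, hk2, hk3⟩; exact ⟨k, by omega, hk2, hk3⟩
          · rintro ⟨k, hk1, hk2, hk3⟩
            refine ⟨k, ?_, hk2, hk3⟩
            by_contra hcon
            have hkm : k ≤ mid.toNat := by omega
            have hklen : k < (pvTrunc matrix c).length := by omega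
            have hle : (pvTrunc matrix c)[k] ≤ v := pv_mono hs hkm hmemN
            have : (pvTrunc matrix c)[k] = target := by
              have := List.getElem?_eq_getElem hklen
              rw [this] at hk3; exact Option.some.inj hk3
            omega
        · rw [if_neg hvlt]
          have hvgt : target < v := by omega
          rw [ih left (mid - 1) (by omega) hl (by omega)]
          constructor
          · rintro ⟨k, hk1, hk2, hk3⟩; exact ⟨k, hk1, by omega, hk3⟩
          · rintro ⟨k, hk1, hk2, hk3⟩
            refine ⟨k, hk1, ?_, hk3⟩
            by_contra hcon
            have hkm : mid.toNat ≤ k := by omega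
            have hklen : k < (pvTrunc matrix c).length := by omega
            have hle : v ≤ (pvTrunc matrix c)[k] := pv_mono hs hkm hklen
            have : (pvTrunc matrix c)[k] = target := by
              have := List.getElem?_eq_getElem hklen
              rw [this] at hk3; exact Option.some.inj hk3
            omega
    · rw [if_neg h]
      simp only [false_iff, Bool.false_eq_true]
      rintro ⟨k, hk1, hk2, _⟩; omega

-- the column cursor never moves right
theorem pv_drop_le {row : List Int} {target : Int} :
    ∀ col : Int, pvDropCol row target col ≤ col := by
  intro col
  induction col using pvDropCol.induct (row := row) (target := target) with
  | case1 col hcol hnone =>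
    rw [pvDropCol, dif_pos hcol, hnone]
  | case2 col hcol v hsome hlt ih =>
    have hred : pvDropCol row target col = pvDropCol row target (col - 1) := by
      rw [pvDropCol, dif_pos hcol, hsome]; simp [hlt]
    rw [hred]; omega
  | case3 col hcol v hsome hge =>
    rw [pvDropCol, dif_pos hcol, hsome]; simp [hge]
  | case4 col hcol =>
    rw [pvDropCol, dif_neg hcol]

-- characterisation of B's inner loop on a sorted row in range
theorem pv_drop_spec {row : List Int} {target : Int} :
    ∀ col : Int, 0 ≤ col → col < (row.length : Int) →
    pvDropCol row target col ≤ col ∧ -1 ≤ pvDropCol row target col ∧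
    (∀ j : Nat, (hj : j < row.length) → pvDropCol row target col < (j : Int) → (j : Int) ≤ col →
      target < row[j]) ∧
    (∀ h0 : 0 ≤ pvDropCol row target col,
      ∃ hlt : (pvDropCol row target col).toNat < row.length,
        row[(pvDropCol row target col).toNat] ≤ target) := by
  intro col
  induction col using pvDropCol.induct (row := row) (target := target) with
  | case1 col hcol hnone =>
    intro _ hlen
    exfalso
    rw [PySem.List.pyGet?_of_nonneg (xs := row) hcol] at hnone
    have hcl : col.toNat < row.length := by omega
    simp [List.getElem?_eq_getElem hcl] at hnone
  | case2 col hcol v hsome hlt ih =>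
    intro _ hlen
    have hred : pvDropCol row target col = pvDropCol row target (col - 1) := by
      rw [pvDropCol, dif_pos hcol, hsome]; simp [hlt]
    have hvv : row[col.toNat]? = some v := by
      rw [← PySem.List.pyGet?_of_nonneg (xs := row) hcol]; exact hsome
    obtain ⟨hcl, hveq⟩ := List.getElem?_eq_some_iff.mp hvv
    rw [hred]
    by_cases hc0 : 0 ≤ col - 1
    · obtain ⟨ih1, ih2, ih3, ih4⟩ := ih hc0 (by omega)
      refine ⟨by omega, by omega, ?_, ih4⟩
      intro j hj h1 h2
      rcases lt_or_ge (j : Int) col with hlt2 | hge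
      · exact ih3 j hj h1 (by omega)
      · have hje : (j : Int) = col := le_antisymm h2 hge
        have hjn : j = col.toNat := by simpa using congrArg Int.toNat hje
        subst hjn; rw [hveq]; exact hlt
    · -- col = 0, the loop recurses to -1 and stops there
      have hcz : col = 0 := by omega
      subst hcz
      have hneg : pvDropCol row target (0 - 1 : Int) = 0 - 1 := by
        rw [pvDropCol]; norm_num
      rw [hneg]
      refine ⟨by norm_num, by norm_num, ?_, ?_⟩
      · intro j hj h1 h2
        have : j = 0 := by omega
        subst this
        have : row[0] = v := by simpa using hveq
        rw [this]; exact hlt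
      · intro h0; exfalso; revert h0; norm_num
  | case3 col hcol v hsome hge =>
    intro _ hlen
    have hred : pvDropCol row target col = col := by
      rw [pvDropCol, dif_pos hcol, hsome]; simp [hge]
    have hvv : row[col.toNat]? = some v := by
      rw [← PySem.List.pyGet?_of_nonneg (xs := row) hcol]; exact hsome
    obtain ⟨hcl, hveq⟩ := List.getElem?_eq_some_iff.mp hvv
    rw [hred]
    refine ⟨le_refl _, by omega, ?_, ?_⟩
    · intro j hj h1 h2; omega
    · intro _; exact ⟨hcl, by rw [hveq]; omega⟩
  | case4 col hcol =>
    intro h0 _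
    exact absurd h0 hcol

-- characterisation of B's row scan on a sorted truncated block of rows
theorem pv_scan_iff {target : Int} {c : Nat} (hc : 0 < c) :
    ∀ (rows : List (List Int)) (col : Int),
    (∀ r ∈ rows, c ≤ r.length) → (pvTrunc rows c).Pairwise (· ≤ ·) →
    0 ≤ col → col < (c : Int) →
    (pvRowScan target rows col = true ↔
      ∃ i j : Nat, i < rows.length ∧ (j : Int) ≤ col ∧
        (pvTrunc rows c)[i * c + j]? = some target) := by
  intro rows
  induction rows with
  | nil =>
    intro col _ _ _ _
    simp only [pvRowScan, false_iff, Bool.false_eq_true]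
    rintro ⟨i, j, h1, _, _⟩; simp at h1
  | cons row rest ih =>
    intro col rect hs h0 hcol
    have hrl : c ≤ row.length := rect row (by simp)
    have hrect' : ∀ r ∈ rest, c ≤ r.length := fun r hr => rect r (by simp [hr])
    have hT : pvTrunc (row :: rest) c = row.take c ++ pvTrunc rest c := by simp [pvTrunc]
    have hTlen : (row.take c).length = c := by simp [List.length_take]; omega
    have hsplit := List.pairwise_append.mp (hT ▸ hs)
    have hrow : (row.take c).Pairwise (· ≤ ·) := hsplit.1
    have hrest : (pvTrunc rest c).Pairwise (· ≤ ·) := hsplit.2.1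
    have hcross : ∀ x ∈ row.take c, ∀ y ∈ pvTrunc rest c, x ≤ y := hsplit.2.2
    obtain ⟨hd1, hd2, hd3, hd4⟩ := pv_drop_spec (row := row) (target := target) col h0 (by omega)
    have hsplit0 : ∀ j : Nat, j < c → (pvTrunc (row :: rest) c)[0 * c + j]? = row[j]? := by
      intro j hj
      rw [hT]
      simp only [Nat.zero_mul, Nat.zero_add]
      rw [List.getElem?_append_left (by omega)]
      exact List.getElem?_take_of_lt hj
    have hsplitS : ∀ i j : Nat,
        (pvTrunc (row :: rest) c)[(i + 1) * c + j]? = (pvTrunc rest c)[i * c + j]? := by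
      intro i j
      rw [hT]
      have he : (i + 1) * c + j = (row.take c).length + (i * c + j) := by rw [hTlen]; ring
      rw [he, List.getElem?_append_right (by omega)]
      simp
    rw [pvRowScan]
    set col' := pvDropCol row target col with hcol'
    by_cases hneg : col' < 0
    · rw [if_pos hneg]
      simp only [false_iff, Bool.false_eq_true]
      rintro ⟨i, j, h1, h2, h3⟩
      have hjc : j < c := by omega
      cases i with
      | zero =>
        rw [hsplit0 j hjc] at h3
        obtain ⟨hjr, heq⟩ := List.getElem?_eq_some_iff.mp h3
        have := hd3 j hjr (by omega) h2
        omega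
      | succ i' =>
        rw [hsplitS i' j] at h3
        obtain ⟨hjr, heq⟩ := List.getElem?_eq_some_iff.mp h3
        have hmem : target ∈ pvTrunc rest c := heq ▸ List.getElem_mem hjr
        have h0r : 0 < row.length := by omega
        have h00 : target < row[0]'h0r := hd3 0 h0r (by omega) (by omega)
        have h0T : 0 < (row.take c).length := by omega
        have hxe : (row.take c)[0]'h0T = row[0]'h0r := List.getElem_take
        have := hcross _ (List.getElem_mem h0T) _ hmem
        rw [hxe] at this
        omega
    · rw [if_neg hneg]
      have h0' : 0 ≤ col' := by omega
      obtain ⟨hltc, hvle⟩ := hd4 h0'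
      have hsome : PySem.List.pyGet? row col' = some (row[col'.toNat]'hltc) := by
        rw [PySem.List.pyGet?_of_nonneg _ h0']
        exact List.getElem?_eq_getElem hltc
      simp only [hsome]
      set v := row[col'.toNat]'hltc with hv
      by_cases hveq : v = target
      · simp only [if_pos hveq, true_iff]
        refine ⟨0, col'.toNat, by simp, by omega, ?_⟩
        rw [hsplit0 col'.toNat (by omega), List.getElem?_eq_getElem hltc, ← hv, hveq]
      · rw [if_neg hveq]
        have hvlt : v < target := by omega
        rw [ih col' hrect' hrest h0' (by omega)]
        constructor
        · rintro ⟨i, j, h1, h2, h3⟩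
          refine ⟨i + 1, j, by simp only [List.length_cons]; omega, by omega, ?_⟩
          rw [hsplitS i j]; exact h3
        · rintro ⟨i, j, h1, h2, h3⟩
          have hjc : j < c := by omega
          cases i with
          | zero =>
            exfalso
            rw [hsplit0 j hjc] at h3
            obtain ⟨hjr, heq⟩ := List.getElem?_eq_some_iff.mp h3
            rcases le_or_gt (j : Int) col' with hle | hgt
            · have hjT : j < (row.take c).length := by omega
              have hcT : col'.toNat < (row.take c).length := by omega
              have h1m := pv_mono hrow (a := j) (b := col'.toNat) (by omega) hcT
              rw [List.getElem_take, List.getElem_take] at h1m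
              have : row[j]'hjr ≤ v := hv ▸ h1m
              omega
            · have := hd3 j hjr (by omega) h2
              omega
          | succ i' =>
            refine ⟨i', j, by simp only [List.length_cons] at h1; omega, ?_, ?_⟩
            · by_contra hcon
              have hj1 : col'.toNat + 1 < row.length := by omega
              have hgt1 : target < row[col'.toNat + 1]'hj1 :=
                hd3 (col'.toNat + 1) hj1 (by push_cast; omega) (by push_cast; omega)
              rw [hsplitS i' j] at h3
              obtain ⟨hjr, heq⟩ := List.getElem?_eq_some_iff.mp h3
              have hmem : target ∈ pvTrunc rest c := heq ▸ List.getElem_mem hjr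
              have hj1T : col'.toNat + 1 < (row.take c).length := by omega
              have hxe : (row.take c)[col'.toNat + 1]'hj1T = row[col'.toNat + 1]'hj1 :=
                List.getElem_take
              have := hcross _ (List.getElem_mem hj1T) _ hmem
              rw [hxe] at this
              omega
            · rw [hsplitS i' j] at h3
              exact h3

theorem pv_a_mem {matrix : List (List Int)} {target : Int}
    (rect : ∀ r ∈ matrix, (matrix.headD []).length ≤ r.length)
    (hs : (pvTrunc matrix (matrix.headD []).length).Pairwise (· ≤ ·)) :
    binary_search_2d matrix target =
      decide (target ∈ pvTrunc matrix (matrix.headD []).length) := by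
  cases matrix with
  | nil => simp [binary_search_2d, pvTrunc]
  | cons r0 tl =>
    simp only [List.headD_cons] at rect hs ⊢
    have rect' : ∀ r ∈ (r0 :: tl), r0.length ≤ r.length := by
      intro r hr; simpa using rect r hr
    by_cases h0 : r0 = []
    · simp [binary_search_2d, h0, pvTrunc, List.mem_flatten]
    · have hc : 0 < r0.length := List.length_pos_iff.mpr h0
      have hlen : (pvTrunc (r0 :: tl) r0.length).length = (r0 :: tl).length * r0.length :=
        pv_flat_len rect'
      have hiff := pv_bs_iff (target := target) rect' hs hc ((r0 :: tl).length * r0.length)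
        0 (((r0 :: tl).length : Int) * (r0.length : Int) - 1)
        (by omega) (le_refl 0) (by rw [hlen]; push_cast; omega)
      have hmem : target ∈ pvTrunc (r0 :: tl) r0.length ↔
          ∃ k : Nat, (0 : Int) ≤ (k : Int) ∧
            (k : Int) ≤ ((r0 :: tl).length : Int) * (r0.length : Int) - 1 ∧
            (pvTrunc (r0 :: tl) r0.length)[k]? = some target := by
        rw [List.mem_iff_getElem?]
        constructor
        · rintro ⟨n, hn⟩
          have hlt := (List.getElem?_eq_some_iff.mp hn).1
          rw [hlen] at hlt
          refine ⟨n, by omega, ?_, hn⟩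
          omega
        · rintro ⟨k, _, _, hk⟩; exact ⟨k, hk⟩
      have hgoal : pvBsLoop (r0 :: tl) target (r0.length : Int) ((r0 :: tl).length * r0.length) 0
          (((r0 :: tl).length : Int) * (r0.length : Int) - 1) =
          decide (target ∈ pvTrunc (r0 :: tl) r0.length) :=
        Bool.eq_iff_iff.mpr (by rw [decide_eq_true_eq]; exact hiff.trans hmem.symm)
      simpa [binary_search_2d, h0] using hgoal

theorem pv_b_mem {matrix : List (List Int)} {target : Int}
    (rect : ∀ r ∈ matrix, (matrix.headD []).length ≤ r.length)
    (hs : (pvTrunc matrix (matrix.headD []).length).Pairwise (· ≤ ·)) :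
    binary_search_2d_alt matrix target =
      decide (target ∈ pvTrunc matrix (matrix.headD []).length) := by
  cases matrix with
  | nil => simp [binary_search_2d_alt, pvTrunc]
  | cons r0 tl =>
    simp only [List.headD_cons] at rect hs ⊢
    have rect' : ∀ r ∈ (r0 :: tl), r0.length ≤ r.length := by
      intro r hr; simpa using rect r hr
    by_cases h0 : r0 = []
    · simp [binary_search_2d_alt, h0, pvTrunc, List.mem_flatten]
    · have hc : 0 < r0.length := List.length_pos_iff.mpr h0
      have hlen : (pvTrunc (r0 :: tl) r0.length).length = (r0 :: tl).length * r0.length :=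
        pv_flat_len rect'
      have hiff := pv_scan_iff (target := target) hc (r0 :: tl) ((r0.length : Int) - 1)
        rect' hs (by omega) (by omega)
      have hmem : target ∈ pvTrunc (r0 :: tl) r0.length ↔
          ∃ i j : Nat, i < (r0 :: tl).length ∧
            (j : Int) ≤ (r0.length : Int) - 1 ∧
            (pvTrunc (r0 :: tl) r0.length)[i * r0.length + j]? = some target := by
        rw [List.mem_iff_getElem?]
        constructor
        · rintro ⟨n, hn⟩
          have hlt := (List.getElem?_eq_some_iff.mp hn).1
          rw [hlen] at hlt
          have hj : n % r0.length < r0.length := Nat.mod_lt _ hc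
          have hi : n / r0.length < (r0 :: tl).length :=
            (Nat.div_lt_iff_lt_mul hc).mpr hlt
          have hidx : n / r0.length * r0.length + n % r0.length = n := by
            rw [Nat.mul_comm]; exact Nat.div_add_mod n r0.length
          refine ⟨n / r0.length, n % r0.length, hi, by omega, ?_⟩
          rw [hidx]; exact hn
        · rintro ⟨i, j, _, _, hk⟩; exact ⟨i * r0.length + j, hk⟩
      have hgoal : pvRowScan target (r0 :: tl) ((r0.length : Int) - 1) =
          decide (target ∈ pvTrunc (r0 :: tl) r0.length) :=
        Bool.eq_iff_iff.mpr (by rw [decide_eq_true_eq]; exact hiff.trans hmem.symm)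
      simpa [binary_search_2d_alt, h0] using hgoal

-- when the target occurs nowhere among the read cells, every probe of A misses
theorem pv_bs_false {matrix : List (List Int)} {target : Int} {c : Nat}
    (rect : ∀ r ∈ matrix, c ≤ r.length) (hc : 0 < c)
    (hnot : target ∉ pvTrunc matrix c) :
    ∀ fuel : Nat, ∀ left right : Int, pvBsLoop matrix target c fuel left right = false := by
  intro fuel
  induction fuel with
  | zero => intro left right; rw [pvBsLoop]
  | succ f ih =>
    intro left right
    rw [pvBsLoop]
    by_cases h : left ≤ right
    · rw [if_pos h]
      set mid := PySem.Int.floordiv (left + right) 2 with hmid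
      cases hlook : (PySem.List.pyGet? matrix (PySem.Int.floordiv mid c)).bind
          (fun r => PySem.List.pyGet? r (PySem.Int.mod mid c)) with
      | none => simp only [hlook]
      | some v =>
        have hcpos : (0 : Int) < (c : Int) := by exact_mod_cast hc
        obtain ⟨r, hr1, hr2⟩ := Option.bind_eq_some_iff.mp hlook
        have hrm : r ∈ matrix := PySem.List.mem_of_pyGet?_eq_some _ hr1
        have hk0 : 0 ≤ PySem.Int.mod mid c := PySem.Int.mod_nonneg _ hcpos
        have hkc : PySem.Int.mod mid c < c := PySem.Int.mod_lt _ hcpos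
        rw [PySem.List.pyGet?_of_nonneg _ hk0] at hr2
        have hkr : (PySem.Int.mod mid c).toNat < c := by omega
        have hrt : (r.take c)[(PySem.Int.mod mid c).toNat]? = some v := by
          rw [List.getElem?_take_of_lt hkr]; exact hr2
        have hvmem : v ∈ pvTrunc matrix c :=
          List.mem_flatten.mpr ⟨r.take c, List.mem_map_of_mem hrm,
            List.mem_of_getElem? hrt⟩
        have hne : v ≠ target := fun he => hnot (he ▸ hvmem)
        simp only [hlook, if_neg hne]
        split
        · exact ih _ _
        · exact ih _ _
    · rw [if_neg h]

-- and every probe of B's row scan misses too (the cursor stays below c)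
theorem pv_scan_false {target : Int} {c : Nat} :
    ∀ (rows : List (List Int)) (col : Int), (∀ r ∈ rows, c ≤ r.length) →
    col < (c : Int) → target ∉ pvTrunc rows c →
    pvRowScan target rows col = false := by
  intro rows
  induction rows with
  | nil => intro col _ _ _; rfl
  | cons row rest ih =>
    intro col rect hcol hnot
    have hrl : c ≤ row.length := rect row (by simp)
    have hrect' : ∀ r ∈ rest, c ≤ r.length := fun r hr => rect r (by simp [hr])
    have hT : pvTrunc (row :: rest) c = row.take c ++ pvTrunc rest c := by simp [pvTrunc]
    rw [pvRowScan]
    set col' := pvDropCol row target col with hcol'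
    have hle : col' ≤ col := pv_drop_le col
    by_cases hneg : col' < 0
    · rw [if_pos hneg]
    · rw [if_neg hneg]
      cases hlook : PySem.List.pyGet? row col' with
      | none => rfl
      | some v =>
        have h0' : 0 ≤ col' := by omega
        rw [PySem.List.pyGet?_of_nonneg _ h0'] at hlook
        have hkc : col'.toNat < c := by omega
        have hrt : (row.take c)[col'.toNat]? = some v := by
          rw [List.getElem?_take_of_lt hkc]; exact hlook
        have hvmem : v ∈ pvTrunc (row :: rest) c := by
          rw [hT]
          exact List.mem_append_left _ (List.mem_of_getElem? hrt)
        have hne : v ≠ target := fun he => hnot (he ▸ hvmem)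
        simp only [if_neg hne]
        exact ih col' hrect' (by omega)
          (fun hm => hnot (by rw [hT]; exact List.mem_append_right _ hm))

-- ===== VERDICT (by name: the statement is the Claim_ definition above) =====
theorem binary_search_2d_spec : Claim_equal_binary_search_2d := by
  intro matrix target _ pre
  obtain ⟨rect, hsn⟩ := pre
  unfold Spec_binary_search_2d
  cases hsn with
  | inl hs => rw [pv_a_mem rect hs, pv_b_mem rect hs]
  | inr hnot =>
    cases matrix with
    | nil => rfl
    | cons r0 tl =>
      simp only [List.headD_cons] at rect hnot
      by_cases h0 : r0 = []
      · simp [binary_search_2d, binary_search_2d_alt, h0]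
      · have hc : 0 < r0.length := List.length_pos_iff.mpr h0
        have rect' : ∀ r ∈ (r0 :: tl), r0.length ≤ r.length := by
          intro r hr; simpa using rect r hr
        have hA : binary_search_2d (r0 :: tl) target = false := by
          simp only [binary_search_2d, if_neg h0]
          exact pv_bs_false rect' hc hnot _ _ _
        have hB : binary_search_2d_alt (r0 :: tl) target = false := by
          simp only [binary_search_2d_alt, if_neg h0]
          exact pv_scan_false _ _ rect' (by omega) hnot
        rw [hA, hB]
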